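-- pv_equiv track=rewrite | github.com/mohamedbahaa94/VM-Calculator- | main.py | calculate_referring_physician_resources
-- ===== SOURCE A (Python) =====
-- def calculate_referring_physician_resources(ref_phys_ccu):
--     """Calculates the Referring Physician VM configuration based on the CCU.
--
--     Args:
--         ref_phys_ccu: The number of Referring Physician concurrent users.
--
--     Returns:
--         A list of tuples [(num_vms, ram_gb, vcores)], each representing a VM configuration.
--     """
--
--     # Referring Physician-specific configuration ranges
--     ccu_thresholds = [8, 16, 24,32, 48, 64]  # Doubled CCU thresholds
--     ram_gb_tiers = [8, 16, 24, 32,48, 64]   # Same RAM tiers as Ultima/RIS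
--     vcores_tiers = [4, 6, 8, 10,10, 12]    # Same vCores tiers as Ultima/RIS
--     max_ccu_per_vm = 64  # Maximum CCU per VM (doubled from Ultima)
--
--     if ref_phys_ccu <= max_ccu_per_vm:
--         # Single VM case: find the appropriate tier
--         for i, threshold in enumerate(ccu_thresholds):
--             if ref_phys_ccu <= threshold:
--                 return [(1, ram_gb_tiers[i], vcores_tiers[i])]
--     else:
--         # Multiple VM case:
--         num_full_vms = ref_phys_ccu // max_ccu_per_vm
--         remaining_ccu = ref_phys_ccu % max_ccu_per_vm
--
--         vm_configs = []
--
--         # Full VMs with max specs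
--         for _ in range(num_full_vms):
--             vm_configs.append((1, ram_gb_tiers[-1], vcores_tiers[-1]))
--
--         if remaining_ccu > 0:
--             # Last VM with remaining CCUs
--             for i, threshold in enumerate(ccu_thresholds):
--                 if remaining_ccu <= threshold:
--                     vm_configs.append((1, ram_gb_tiers[i], vcores_tiers[i]))
--                     break
--
--         return vm_configs
-- ===== SOURCE B (Python) =====
-- def calculate_referring_physician_resources(ref_phys_ccu):
--     """Closed-form tier arithmetic instead of a linear threshold scan."""
--     if ref_phys_ccu <= 64:
--         return [_tier(ref_phys_ccu)]
--     full = ref_phys_ccu // 64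
--     rem = ref_phys_ccu % 64
--     configs = [(1, 64, 12)] * full
--     if rem > 0:
--         configs.append(_tier(rem))
--     return configs
--
--
-- def _tier(c):
--     # c is at most the per-VM cap here; the low tiers are linear in the 8-CCU bucket index,
--     # followed by the two fixed top tiers
--     if c <= 32:
--         i = max((c + 7) // 8, 1)
--         return (1, 8 * i, 2 * i + 2)
--     if c <= 48:
--         return (1, 48, 10)
--     return (1, 64, 12)
-- ===== Notes on version B (the rewrite author's own statement) =====
-- stated objective: simpler
-- what changed: Replaces the linear enumerate/threshold scan with a closed-form arithmetic tier formula and builds the full-VM prefix by list multiplication instead of an append loop.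
import Mathlib
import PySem

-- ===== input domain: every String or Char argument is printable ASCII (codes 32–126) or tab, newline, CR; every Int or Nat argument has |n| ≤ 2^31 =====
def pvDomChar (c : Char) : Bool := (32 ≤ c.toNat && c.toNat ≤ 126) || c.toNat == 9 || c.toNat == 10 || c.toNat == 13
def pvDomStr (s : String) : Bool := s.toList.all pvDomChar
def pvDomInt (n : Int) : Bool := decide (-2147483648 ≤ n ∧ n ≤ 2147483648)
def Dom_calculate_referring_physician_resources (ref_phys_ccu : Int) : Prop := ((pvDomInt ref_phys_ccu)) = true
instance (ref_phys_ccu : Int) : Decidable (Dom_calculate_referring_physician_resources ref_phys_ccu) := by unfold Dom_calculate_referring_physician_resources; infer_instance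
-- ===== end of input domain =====

-- B replaces A's linear threshold scan by a closed-form arithmetic tier formula (objective: simpler).

-- ===== PORT A =====
-- A's 'for i, threshold in enumerate(ccu_thresholds): if c <= threshold: return/append'
-- ported as a structural scan over the thresholds zipped with their (ram, vcores) rows.
def pvTiersTable : List (Int × Int × Int) :=
  [(8, 8, 4), (16, 16, 6), (24, 24, 8), (32, 32, 10), (48, 48, 10), (64, 64, 12)]

def pvScanTiers (c : Int) : List (Int × Int × Int) → Option (Int × Int × Int)
  | [] => none
  | (thr, ram, vc) :: rest => if c ≤ thr then some (1, ram, vc) else pvScanTiers c rest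

def calculate_referring_physician_resources (ref_phys_ccu : Int) : List (Int × Int × Int) :=
  if ref_phys_ccu ≤ 64 then
    -- the scan always matches (last threshold is 64); the none branch is unreachable
    match pvScanTiers ref_phys_ccu pvTiersTable with
    | some t => [t]
    | none => []
  else
    let num_full_vms := PySem.Int.floordiv ref_phys_ccu 64
    let remaining_ccu := PySem.Int.mod ref_phys_ccu 64
    let vm_configs := (PySem.List.pyRange 0 num_full_vms 1).foldl
      (fun acc _ => acc ++ [((1 : Int), (64 : Int), (12 : Int))]) []
    if remaining_ccu > 0 then
      match pvScanTiers remaining_ccu pvTiersTable with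
      | some t => vm_configs ++ [t]
      | none => vm_configs
    else vm_configs

-- ===== PORT B =====
def pvTier (c : Int) : Int × Int × Int :=
  if c ≤ 32 then
    let i := max (PySem.Int.floordiv (c + 7) 8) 1
    (1, 8 * i, 2 * i + 2)
  else if c ≤ 48 then (1, 48, 10)
  else (1, 64, 12)

def calculate_referring_physician_resources_alt (ref_phys_ccu : Int) : List (Int × Int × Int) :=
  if ref_phys_ccu ≤ 64 then [pvTier ref_phys_ccu]
  else
    let full := PySem.Int.floordiv ref_phys_ccu 64
    let rem := PySem.Int.mod ref_phys_ccu 64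
    let configs := List.replicate full.toNat (1, 64, 12)
    if rem > 0 then configs ++ [pvTier rem] else configs

-- ===== PRECONDITION & SPEC =====
def Spec_calculate_referring_physician_resources (ref_phys_ccu : Int) (out : List (Int × Int × Int)) : Prop := out = calculate_referring_physician_resources_alt ref_phys_ccu
instance (ref_phys_ccu : Int) (out : List (Int × Int × Int)) : Decidable (Spec_calculate_referring_physician_resources ref_phys_ccu out) := by unfold Spec_calculate_referring_physician_resources; infer_instance

-- ===== CLAIM (what is proved, stated in full; the proofs are below) =====
def Claim_equal_calculate_referring_physician_resources : Prop := ∀ (ref_phys_ccu : Int), Dom_calculate_referring_physician_resources ref_phys_ccu → Spec_calculate_referring_physician_resources ref_phys_ccu (calculate_referring_physician_resources ref_phys_ccu)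

-- ===== LEMMAS AND PROOFS =====

lemma pvScan_eq_tier (c : Int) (h : c ≤ 64) :
    pvScanTiers c pvTiersTable = some (pvTier c) := by
  have h8 : PySem.Int.floordiv (c + 7) 8 = (c + 7) / 8 :=
    PySem.Int.floordiv_eq_ediv_of_pos (by omega)
  simp only [pvTiersTable, pvScanTiers, pvTier, h8]
  split_ifs <;> simp_all <;> omega

lemma pvFoldl_const_append {α : Type} (l : List Int) (acc : List α) (x : α) :
    l.foldl (fun a _ => a ++ [x]) acc = acc ++ List.replicate l.length x := by
  induction l generalizing acc with
  | nil => simp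
  | cons y ys ih =>
    simp [List.foldl_cons, ih, List.replicate_succ]

-- ===== VERDICT (by name: the statement is the Claim_ definition above) =====
theorem calculate_referring_physician_resources_spec : Claim_equal_calculate_referring_physician_resources := by
  intro c _
  unfold Spec_calculate_referring_physician_resources
  unfold calculate_referring_physician_resources calculate_referring_physician_resources_alt
  by_cases h : c ≤ 64
  · simp [h, pvScan_eq_tier c h]
  · simp only [h, if_false]
    have hrem : 0 ≤ PySem.Int.mod c 64 ∧ PySem.Int.mod c 64 < 64 := by
      rw [PySem.Int.mod_eq_emod_of_pos (by omega)]
      constructor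
      · exact Int.emod_nonneg c (by omega)
      · exact Int.emod_lt_of_pos c (by omega)
    have hrep : (PySem.List.pyRange 0 (PySem.Int.floordiv c 64) 1).foldl
        (fun acc _ => acc ++ [((1 : Int), (64 : Int), (12 : Int))]) []
        = List.replicate (PySem.Int.floordiv c 64).toNat (1, 64, 12) := by
      rw [pvFoldl_const_append, PySem.List.length_pyRange_one]
      norm_num
    rw [hrep]
    have hmod : PySem.Int.mod c 64 = c % 64 := PySem.Int.mod_eq_emod_of_pos (by omega)
    rw [hmod] at hrem ⊢
    by_cases hr : 0 < c % 64
    · have hs := pvScan_eq_tier (c % 64) (by omega)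
      simp [hr, hs]
    · simp [hr]
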